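-- pv_equiv track=rewrite | github.com/lukasidman/XTope | src/antigen_screener/ra_diagonal_filter.py | _find_diagonal_chains
-- ===== SOURCE A (Python) =====
-- from collections import defaultdict
--
-- def _find_diagonal_chains(
--
--     seed_pairs: dict[str, list[tuple[int, int]]],
-- ) -> dict[str, tuple[int, int, int]]:
--     """Find the longest diagonal chain per candidate.
--
--     A diagonal chain is a run of consecutive (query_pos, target_pos) pairs
--     where both positions increment by 1 each step — meaning the reduced
--     k-mers are adjacent and on the same alignment diagonal.
--
--     Args:
--         seed_pairs: target_id → list of (query_pos, target_pos) seed hits.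
--
--     Returns:
--         target_id → (chain_length, best_diagonal, chain_start_qpos).
--         best_diagonal is query_pos - target_pos for the diagonal with the
--         longest chain. chain_start_qpos is the query position where the
--         best chain begins.
--     """
--     result: dict[str, tuple[int, int, int]] = {}
--     for target_id, pairs in seed_pairs.items():
--         # Group by diagonal (query_pos - target_pos)
--         diagonals: dict[int, list[int]] = defaultdict(list)
--         for qp, tp in pairs:
--             diag = qp - tp
--             diagonals[diag].append(qp)
--
--         max_chain = 0
--         best_diag = 0
--         best_start_qpos = 0
--         for diag, positions in diagonals.items():
--             positions.sort()
--             chain = 1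
--             chain_start = positions[0]
--             run_best = 1
--             run_best_start = positions[0]
--             for i in range(1, len(positions)):
--                 if positions[i] == positions[i - 1] + 1:
--                     chain += 1
--                     if chain > run_best:
--                         run_best = chain
--                         run_best_start = chain_start
--                 else:
--                     chain = 1
--                     chain_start = positions[i]
--             if run_best > max_chain:
--                 max_chain = run_best
--                 best_diag = diag
--                 best_start_qpos = run_best_start
--
--         result[target_id] = (max_chain, best_diag, best_start_qpos)
--     return result
-- ===== SOURCE B (Python) =====
-- from collections import defaultdict
--
-- def _find_diagonal_chains(seed_pairs):
--     """Same result as A, computed with a back-to-front run-length DP per diagonal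
--     and a max()-selection over candidate triples instead of a stateful forward scan."""
--     result = {}
--     for target_id, pairs in seed_pairs.items():
--         diagonals = defaultdict(list)
--         for qp, tp in pairs:
--             diagonals[qp - tp].append(qp)
--
--         candidates = []
--         for diag, positions in diagonals.items():
--             positions.sort()
--             n = len(positions)
--             # g[i] = length of the consecutive run starting at index i, filled back-to-front
--             g = [1] * n
--             for i in range(n - 2, -1, -1):
--                 if positions[i + 1] == positions[i] + 1:
--                     g[i] = g[i + 1] + 1
--             best = max(g)
--             candidates.append((best, diag, positions[g.index(best)]))
--
--         result[target_id] = max(candidates, key=lambda c: c[0]) if candidates else (0, 0, 0)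
--     return result
-- ===== Notes on version B (the rewrite author's own statement) =====
-- stated objective: alternative
-- what changed: Per diagonal, B computes run lengths with a back-to-front DP array (g[i] = length of the consecutive run starting at i) and picks the answer with max()/index() over candidate triples, instead of A's forward scan that maintains chain/chain_start/run_best/run_best_start state and a running best triple.
import Mathlib
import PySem

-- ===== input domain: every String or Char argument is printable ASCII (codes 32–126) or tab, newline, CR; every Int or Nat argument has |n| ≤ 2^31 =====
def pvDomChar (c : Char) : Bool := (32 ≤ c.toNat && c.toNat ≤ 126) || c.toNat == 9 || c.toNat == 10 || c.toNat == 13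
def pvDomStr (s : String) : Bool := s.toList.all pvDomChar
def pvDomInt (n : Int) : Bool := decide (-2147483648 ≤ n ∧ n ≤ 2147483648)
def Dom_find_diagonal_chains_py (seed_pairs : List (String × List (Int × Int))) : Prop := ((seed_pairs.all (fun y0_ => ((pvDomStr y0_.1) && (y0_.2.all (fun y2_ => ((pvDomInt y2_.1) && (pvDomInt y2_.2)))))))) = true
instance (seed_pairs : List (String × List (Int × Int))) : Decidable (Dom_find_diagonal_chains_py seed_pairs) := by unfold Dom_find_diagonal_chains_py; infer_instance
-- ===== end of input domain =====

-- B replaces A's forward scan (chain/chain_start/run_best/run_best_start state) by a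
-- back-to-front run-length DP per diagonal plus a max()-selection over candidate triples;
-- same cost, alternative structure. Equal return value proved for every input.

-- ===== PORT A =====
-- inner loop 'for i in range(1, len(positions))' of A, state (chain, chain_start, run_best, run_best_start), prev = positions[i-1]
def scanA : Int → Int → Int → Int → Int → List Int → Int × Int
  | _, _, _, run_best, run_best_start, [] => (run_best, run_best_start)
  | prev, chain, chain_start, run_best, run_best_start, x :: rest =>
    if x = prev + 1 then
      if chain + 1 > run_best then scanA x (chain + 1) chain_start (chain + 1) chain_start rest
      else scanA x (chain + 1) chain_start run_best run_best_start rest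
    else scanA x 1 x run_best run_best_start rest

-- 'diagonals' defaultdict(list) grouping loop of A
def groupDiagA (pairs : List (Int × Int)) : PySem.Dict Int (List Int) :=
  pairs.foldl (fun d p => d.modify (p.1 - p.2) [] (fun l => l ++ [p.1])) PySem.Dict.empty

-- per-diagonal body of A: positions.sort(); forward scan (positions[0] is never out of range at call sites: diagonal lists are nonempty)
def diagBestA (positions : List Int) : Int × Int :=
  let ps := PySem.List.sorted positions (fun x => x) false
  let p0 := PySem.List.pyGetD ps 0 0
  scanA p0 1 p0 1 p0 ps.tail

-- per-target body of A: loop over diagonals.items() keeping (max_chain, best_diag, best_start_qpos)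
def bestA (pairs : List (Int × Int)) : Int × Int × Int :=
  (groupDiagA pairs).items.foldl
    (fun acc kv =>
      let r := diagBestA kv.2
      if r.1 > acc.1 then (r.1, kv.1, r.2) else acc) (0, 0, 0)

def find_diagonal_chains_py (seed_pairs : List (String × List (Int × Int))) : List (String × Int × Int × Int) :=
  let d := seed_pairs.foldl (fun acc kv => acc.insert kv.1 kv.2) PySem.Dict.empty
  (d.items.foldl (fun res kv => res.insert kv.1 (bestA kv.2)) PySem.Dict.empty).items

-- ===== PORT B =====
-- back-to-front DP of B: g[i] = length of the consecutive run starting at index i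
def gB : List Int → List Int
  | [] => []
  | [_] => [1]
  | p :: q :: t => (if q = p + 1 then (gB (q :: t)).headI + 1 else 1) :: gB (q :: t)

-- per-diagonal body of B: positions.sort(); best = max(g); positions[g.index(best)]
def diagBestB (positions : List Int) : Int × Int :=
  let ps := PySem.List.sorted positions (fun x => x) false
  let g := gB ps
  let best := (PySem.List.max? g (fun x => x)).getD 0
  let i := (PySem.List.index? g best).getD 0
  (best, PySem.List.pyGetD ps (i : Int) 0)

-- per-target body of B: candidates list, then max(candidates, key=lambda c: c[0]) with default (0,0,0)
-- (Source B's grouping loop is textually the same as A's, so the shared helper groupDiagA is reused)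
def bestB (pairs : List (Int × Int)) : Int × Int × Int :=
  let cands := (groupDiagA pairs).items.foldl
    (fun acc kv =>
      let r := diagBestB kv.2
      acc ++ [(r.1, kv.1, r.2)]) []
  PySem.List.maxD cands (fun c => c.1) (0, 0, 0)

def find_diagonal_chains_py_alt (seed_pairs : List (String × List (Int × Int))) : List (String × Int × Int × Int) :=
  let d := seed_pairs.foldl (fun acc kv => acc.insert kv.1 kv.2) PySem.Dict.empty
  (d.items.foldl (fun res kv => res.insert kv.1 (bestB kv.2)) PySem.Dict.empty).items

-- ===== PRECONDITION & SPEC =====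
def Spec_find_diagonal_chains_py (seed_pairs : List (String × List (Int × Int))) (out : List (String × Int × Int × Int)) : Prop := out = find_diagonal_chains_py_alt seed_pairs
instance (seed_pairs : List (String × List (Int × Int))) (out : List (String × Int × Int × Int)) : Decidable (Spec_find_diagonal_chains_py seed_pairs out) := by unfold Spec_find_diagonal_chains_py; infer_instance

-- ===== CLAIM (what is proved, stated in full; the proofs are below) =====
def Claim_equal_find_diagonal_chains_py : Prop := ∀ (seed_pairs : List (String × List (Int × Int))), Dom_find_diagonal_chains_py seed_pairs → Spec_find_diagonal_chains_py seed_pairs (find_diagonal_chains_py seed_pairs)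

-- ===== LEMMAS AND PROOFS =====

-- first-strict-max selection fold shared by both characterizations
def selp (z : Int × Int) (bs : List (Int × Int)) : Int × Int :=
  bs.foldl (fun a c => if a.1 < c.1 then c else a) z

-- maximal consecutive blocks (length, start) of a sorted list, mid-block state (prev, start, len)
def mkBlocks : Int → Int → Int → List Int → List (Int × Int)
  | _, cs, cl, [] => [(cl, cs)]
  | prev, cs, cl, x :: rest =>
    if x = prev + 1 then mkBlocks x cs (cl + 1) rest else (cl, cs) :: mkBlocks x x 1 rest

-- length of the run continuing prev+1, prev+2, …
def extLen : Int → List Int → Int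
  | _, [] => 0
  | prev, x :: rest => if x = prev + 1 then 1 + extLen x rest else 0

-- blocks remaining after the current run is finished
def blocksAfter : Int → List Int → List (Int × Int)
  | _, [] => []
  | prev, x :: rest => if x = prev + 1 then blocksAfter x rest else mkBlocks x x 1 rest

theorem extLen_nonneg (rest : List Int) (prev : Int) : 0 ≤ extLen prev rest := by
  induction rest generalizing prev with
  | nil => simp [extLen]
  | cons x r ih =>
    simp only [extLen]
    split
    · have := ih x; omega
    · omega

theorem mkBlocks_eq (rest : List Int) (prev cs cl : Int) :
    mkBlocks prev cs cl rest = (cl + extLen prev rest, cs) :: blocksAfter prev rest := by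
  induction rest generalizing prev cs cl with
  | nil => simp [mkBlocks, extLen, blocksAfter]
  | cons x r ih =>
    simp only [mkBlocks, extLen, blocksAfter]
    split
    · rw [ih]
      have h : cl + 1 + extLen x r = cl + (1 + extLen x r) := by ring
      rw [h]
    · simp

theorem selp_fst_ge (bs : List (Int × Int)) (z : Int × Int) : z.1 ≤ (selp z bs).1 := by
  induction bs generalizing z with
  | nil => exact le_refl _
  | cons c bs ih =>
    simp only [selp, List.foldl_cons]
    refine le_trans ?_ (ih (if z.1 < c.1 then c else z))
    split
    · omega
    · exact le_refl _

theorem scanA_eq_selp (rest : List Int) (prev chain cs rb rbs : Int)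
    (h1 : 1 ≤ chain) (h2 : chain ≤ rb) :
    scanA prev chain cs rb rbs rest = selp (rb, rbs) (mkBlocks prev cs chain rest) := by
  induction rest generalizing prev chain cs rb rbs with
  | nil =>
    simp only [scanA, mkBlocks, selp, List.foldl_cons, List.foldl_nil]
    split
    · exfalso; omega
    · rfl
  | cons x r ih =>
    simp only [scanA, mkBlocks]
    by_cases hx : x = prev + 1
    · rw [if_pos hx, if_pos hx]
      by_cases hgt : chain + 1 > rb
      · rw [if_pos hgt, ih x (chain + 1) cs (chain + 1) cs (by omega) (by omega)]
        rw [mkBlocks_eq r x cs (chain + 1)]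
        have he := extLen_nonneg r x
        simp only [selp, List.foldl_cons]
        congr 1
        rw [if_pos (show rb < chain + 1 + extLen x r by omega)]
        by_cases h0 : chain + 1 < chain + 1 + extLen x r
        · rw [if_pos h0]
        · rw [if_neg h0]
          have h00 : extLen x r = 0 := by omega
          rw [h00, add_zero]
      · rw [if_neg hgt, ih x (chain + 1) cs rb rbs (by omega) (by omega)]
    · rw [if_neg hx, if_neg hx, ih x 1 x rb rbs (by omega) (by omega)]
      simp only [selp, List.foldl_cons]
      split
      · exfalso; omega
      · rfl

theorem gB_cons (t : List Int) (p : Int) : gB (p :: t) = (1 + extLen p t) :: gB t := by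
  induction t generalizing p with
  | nil => simp [gB, extLen]
  | cons q t' ih =>
    simp only [gB]
    rw [ih q]
    simp only [List.headI]
    congr 1
    simp only [extLen]
    split_ifs with hq
    · omega
    · omega

theorem gB_length (ps : List Int) : (gB ps).length = ps.length := by
  induction ps with
  | nil => rfl
  | cons p t ih => rw [gB_cons]; simp [ih]

theorem gB_zip_eq_mkBlocks (t : List Int) (p : Int) (z : Int × Int) (hz : 1 ≤ z.1) :
    selp z ((gB (p :: t)).zip (p :: t)) = selp z (mkBlocks p p 1 t) := by
  induction t generalizing p z with
  | nil => rfl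
  | cons q t' ih =>
    rw [gB_cons]
    by_cases hq : q = p + 1
    · have he : extLen p (q :: t') = 1 + extLen q t' := by simp [extLen, hq]
      have he' := extLen_nonneg t' q
      rw [he]
      have hmk : mkBlocks p p 1 (q :: t') = mkBlocks q p (1 + 1) t' := by
        simp only [mkBlocks]; rw [if_pos hq]
      rw [hmk, mkBlocks_eq t' q p (1 + 1)]
      simp only [List.zip_cons_cons, selp, List.foldl_cons]
      have h2 : (1 + (1 + extLen q t') : Int) = 1 + 1 + extLen q t' := by ring
      simp only [h2]
      have hI : 1 ≤ (if z.1 < 1 + 1 + extLen q t' then ((1 + 1 + extLen q t', p) : Int × Int) else z).1 := by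
        split
        · change (1 : Int) ≤ 1 + 1 + extLen q t'; omega
        · exact hz
      rw [show (List.foldl (fun a c => if a.1 < c.1 then c else a)
            (if z.1 < 1 + 1 + extLen q t' then ((1 + 1 + extLen q t', p) : Int × Int) else z)
            ((gB (q :: t')).zip (q :: t')))
          = selp (if z.1 < 1 + 1 + extLen q t' then ((1 + 1 + extLen q t', p) : Int × Int) else z)
              ((gB (q :: t')).zip (q :: t')) from rfl]
      rw [ih q _ hI, mkBlocks_eq t' q q 1]
      simp only [selp, List.foldl_cons]
      congr 1
      rw [if_neg (show ¬ (if z.1 < 1 + 1 + extLen q t' then ((1 + 1 + extLen q t', p) : Int × Int) else z).1 < 1 + extLen q t' from by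
        split
        · change ¬ (1 + 1 + extLen q t' : Int) < 1 + extLen q t'; omega
        · omega)]
    · have he : extLen p (q :: t') = 0 := by simp [extLen, hq]
      rw [he, add_zero]
      have hmk : mkBlocks p p 1 (q :: t') = (1, p) :: mkBlocks q q 1 t' := by
        simp only [mkBlocks]; rw [if_neg hq]
      rw [hmk]
      simp only [List.zip_cons_cons, selp, List.foldl_cons]
      rw [if_neg (show ¬ z.1 < (1 : Int) by omega)]
      exact ih q z hz

theorem foldl_istep_le (t : List Int) (a : Int) :
    a ≤ t.foldl (fun u v => if u < v then v else u) a := by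
  induction t generalizing a with
  | nil => exact le_refl _
  | cons x t ih =>
    simp only [List.foldl_cons]
    refine le_trans ?_ (ih (if a < x then x else a))
    split <;> omega

theorem foldl_istep_mem (t : List Int) (a : Int) :
    t.foldl (fun u v => if u < v then v else u) a = a ∨
      t.foldl (fun u v => if u < v then v else u) a ∈ t := by
  induction t generalizing a with
  | nil => exact Or.inl rfl
  | cons x t ih =>
    simp only [List.foldl_cons]
    rcases ih (if a < x then x else a) with h | h
    · rw [h]
      split
      · exact Or.inr List.mem_cons_self
      · exact Or.inl rfl
    · exact Or.inr (List.mem_cons_of_mem _ h)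

theorem foldl_istep_comm (t : List Int) (a b : Int) :
    t.foldl (fun u v => if u < v then v else u) (if a < b then b else a)
      = if a < t.foldl (fun u v => if u < v then v else u) b
          then t.foldl (fun u v => if u < v then v else u) b else a := by
  induction t generalizing b with
  | nil => rfl
  | cons x t ih =>
    simp only [List.foldl_cons]
    rw [show (if (if a < b then b else a) < x then x else (if a < b then b else a))
        = (if a < (if b < x then x else b) then (if b < x then x else b) else a) from by
      split_ifs <;> omega]
    exact ih (if b < x then x else b)

theorem max?_cons_foldl {α : Type} (key : α → Int) (c : α) (cs : List α) :
    PySem.List.max? (c :: cs) key = some (cs.foldl (fun a x => if key a < key x then x else a) c) := by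
  simp only [PySem.List.max?, List.foldl_cons]
  induction cs generalizing c with
  | nil => rfl
  | cons x t ih =>
    simp only [List.foldl_cons]
    show List.foldl _ (if key c < key x then some x else some c) t = _
    by_cases h : key c < key x
    · rw [if_pos h, if_pos h]; exact ih x
    · rw [if_neg h, if_neg h]; exact ih c

theorem selp_zip_cons (g' : List Int) (l : Int) (ps : List Int) (z : Int × Int)
    (hlen : (l :: g').length = ps.length) :
    selp z ((l :: g').zip ps) =
      if z.1 < g'.foldl (fun a x => if a < x then x else a) l then
        (g'.foldl (fun a x => if a < x then x else a) l,
         PySem.List.pyGetD ps (((PySem.List.index? (l :: g')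
            (g'.foldl (fun a x => if a < x then x else a) l)).getD 0 : Nat) : Int) 0)
      else z := by
  induction g' generalizing l ps z with
  | nil =>
    cases ps with
    | nil => simp at hlen
    | cons p ps' =>
      simp only [List.zip_cons_cons, List.zip_nil_left, selp, List.foldl_cons, List.foldl_nil]
      by_cases h : z.1 < l
      · rw [if_pos h, if_pos h, PySem.List.index?_cons_self]
        simp [PySem.List.pyGetD_zero_cons]
      · rw [if_neg h, if_neg h]
  | cons y t ih =>
    cases ps with
    | nil => simp at hlen
    | cons p ps' =>
      have hlen' : (y :: t).length = ps'.length := by simpa using hlen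
      simp only [List.zip_cons_cons, selp, List.foldl_cons]
      rw [show (List.foldl (fun a c => if a.1 < c.1 then c else a)
            (if z.1 < l then ((l, p) : Int × Int) else z) ((y :: t).zip ps'))
          = selp (if z.1 < l then ((l, p) : Int × Int) else z) ((y :: t).zip ps') from rfl]
      rw [ih y ps' _ hlen']
      rw [foldl_istep_comm t l y]
      set m' := t.foldl (fun u v => if u < v then v else u) y with hm'
      by_cases h1 : l < m'
      · rw [if_pos h1]
        have hmem : m' ∈ (y :: t) := by
          rcases foldl_istep_mem t y with h | h
          · rw [hm', h]; exact List.mem_cons_self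
          · exact List.mem_cons_of_mem _ (hm' ▸ h)
        have hne : l ≠ m' := by omega
        obtain ⟨k, hk⟩ := Option.isSome_iff_exists.mp (((PySem.List.index?_isSome_iff (y :: t) m')).mpr hmem)
        rw [PySem.List.index?_cons_of_ne (y :: t) hne, hk]
        simp only [Option.map_some, Option.getD_some]
        by_cases h2 : z.1 < m'
        · rw [if_pos h2]
          have hR : (if z.1 < l then ((l, p) : Int × Int) else z).1 < m' := by
            split
            · simpa using h1
            · exact h2
          rw [if_pos hR]
          congr 1
          rw [PySem.List.pyGetD_natCast, PySem.List.pyGetD_natCast]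
          simp
        · rw [if_neg h2]
          have hzl : ¬ z.1 < l := by omega
          rw [if_neg hzl]
          rw [if_neg h2]
      · rw [if_neg h1]
        rw [PySem.List.index?_cons_self]
        simp only [Option.getD_some]
        by_cases h2 : z.1 < l
        · rw [if_pos h2, if_pos h2]
          have hR : ¬ (((l, p) : Int × Int)).1 < m' := by simpa using h1
          rw [if_neg hR]
          simp [PySem.List.pyGetD_zero_cons]
        · rw [if_neg h2, if_neg h2]
          rw [if_neg (show ¬ (z.1 < m') by omega)]

theorem diagBestA_fst_ge_one (ps : List Int) (h : ps ≠ []) : 1 ≤ (diagBestA ps).1 := by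
  have hs : PySem.List.sorted ps (fun x => x) false ≠ [] := by
    rw [Ne, PySem.List.sorted_eq_nil_iff]; exact h
  obtain ⟨p, t, hpt⟩ := List.exists_cons_of_ne_nil hs
  unfold diagBestA
  simp only [hpt, PySem.List.pyGetD_zero_cons, List.tail_cons]
  rw [scanA_eq_selp t p 1 p 1 p (le_refl 1) (le_refl 1)]
  exact selp_fst_ge _ _

theorem diagBestA_eq_diagBestB (ps : List Int) (h : ps ≠ []) : diagBestA ps = diagBestB ps := by
  have hs : PySem.List.sorted ps (fun x => x) false ≠ [] := by
    rw [Ne, PySem.List.sorted_eq_nil_iff]; exact h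
  obtain ⟨p, t, hpt⟩ := List.exists_cons_of_ne_nil hs
  unfold diagBestA diagBestB
  simp only [hpt, PySem.List.pyGetD_zero_cons, List.tail_cons]
  rw [scanA_eq_selp t p 1 p 1 p (le_refl 1) (le_refl 1)]
  rw [← gB_zip_eq_mkBlocks t p (1, p) (by simp)]
  rw [gB_cons t p]
  have hlen : ((1 + extLen p t) :: gB t).length = (p :: t).length := by
    simp [gB_length]
  rw [selp_zip_cons (gB t) (1 + extLen p t) (p :: t) (1, p) hlen]
  rw [max?_cons_foldl (fun x => x) (1 + extLen p t) (gB t)]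
  simp only [Option.getD_some]
  set m := (gB t).foldl (fun a x => if a < x then x else a) (1 + extLen p t) with hm
  by_cases h1 : (1 : Int) < m
  · rw [if_pos (by simpa using h1)]
  · rw [if_neg (by simpa using h1)]
    have hle : 1 + extLen p t ≤ m := hm ▸ foldl_istep_le (gB t) (1 + extLen p t)
    have he := extLen_nonneg t p
    have hm1 : m = 1 := by omega
    have hext : extLen p t = 0 := by omega
    rw [hm1, hext, add_zero, PySem.List.index?_cons_self]
    simp [PySem.List.pyGetD_zero_cons]

theorem groupDiagA_values_ne_nil (pairs : List (Int × Int)) :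
    ∀ kv ∈ (groupDiagA pairs).items, kv.2 ≠ [] := by
  intro kv hkv
  obtain ⟨k, v⟩ := kv
  have hmap : groupDiagA pairs
      = (pairs.map (fun p => (p.1 - p.2, p.1))).foldl
          (fun d q => d.modify q.1 [] (fun l => l ++ [q.2])) PySem.Dict.empty := by
    unfold groupDiagA; rw [List.foldl_map]
  have hnd : (groupDiagA pairs).keys.Nodup := by
    rw [hmap]
    exact PySem.Dict.nodup_keys_foldl_modify_key _ _ _ _ _
      (by rw [PySem.Dict.keys_empty]; exact List.nodup_nil)
  have hget : (groupDiagA pairs).getD k [] = v :=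
    PySem.Dict.getD_of_mem_items _ hkv hnd []
  have hchar : (groupDiagA pairs).getD k []
      = ((pairs.map (fun p => (p.1 - p.2, p.1))).filter (fun q => q.1 == k)).map (fun q => q.2) := by
    rw [hmap, PySem.Dict.getD_foldl_modify_append]
    simp
  have hk : k ∈ (groupDiagA pairs).keys := PySem.Dict.mem_keys_of_mem_items _ hkv
  have hkeys : (groupDiagA pairs).keys
      = PySem.Set.ofList ((pairs.map (fun p => (p.1 - p.2, p.1))).map (fun q => q.1)) := by
    rw [hmap, PySem.Dict.keys_foldl_modify_key, PySem.Dict.keys_empty, PySem.Set.update_nil_left]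
  intro hv
  have hnilmap : ((pairs.map (fun p => (p.1 - p.2, p.1))).filter (fun q => q.1 == k)).map (fun q => q.2) = [] := by
    rw [← hchar, hget]; exact hv
  have hfil : (pairs.map (fun p => (p.1 - p.2, p.1))).filter (fun q => q.1 == k) = [] :=
    List.map_eq_nil_iff.mp hnilmap
  rw [hkeys] at hk
  have hk2 : k ∈ (pairs.map (fun p => (p.1 - p.2, p.1))).map (fun q => q.1) :=
    (PySem.Set.mem_ofList _ _).mp hk
  obtain ⟨q, hq, hqk⟩ := List.mem_map.mp hk2
  have hmemf : q ∈ (pairs.map (fun p => (p.1 - p.2, p.1))).filter (fun q => q.1 == k) :=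
    List.mem_filter.mpr ⟨hq, by simp [hqk]⟩
  rw [hfil] at hmemf
  simp at hmemf

theorem maxD_eq_foldl (cs : List (Int × Int × Int)) (h : ∀ c ∈ cs, 1 ≤ c.1) :
    PySem.List.maxD cs (fun c => c.1) (0, 0, 0) =
      cs.foldl (fun a c => if a.1 < c.1 then c else a) ((0 : Int), (0 : Int), (0 : Int)) := by
  cases cs with
  | nil => rfl
  | cons c cs' =>
    have hc : 1 ≤ c.1 := h c List.mem_cons_self
    unfold PySem.List.maxD
    rw [max?_cons_foldl]
    simp only [Option.getD_some, List.foldl_cons]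
    rw [if_pos (show (0 : Int) < c.1 by omega)]

theorem bestA_eq_bestB (pairs : List (Int × Int)) : bestA pairs = bestB pairs := by
  have hAB : ∀ kv ∈ (groupDiagA pairs).items, diagBestA kv.2 = diagBestB kv.2 := fun kv hkv =>
    diagBestA_eq_diagBestB kv.2 (groupDiagA_values_ne_nil pairs kv hkv)
  have hge1 : ∀ kv ∈ (groupDiagA pairs).items, 1 ≤ (diagBestB kv.2).1 := fun kv hkv => by
    rw [← hAB kv hkv]
    exact diagBestA_fst_ge_one kv.2 (groupDiagA_values_ne_nil pairs kv hkv)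
  simp only [bestA, bestB]
  rw [PySem.List.foldl_append_singleton_eq_map
    (fun kv => ((diagBestB kv.2).1, kv.1, (diagBestB kv.2).2)) (groupDiagA pairs).items []]
  rw [List.nil_append]
  rw [maxD_eq_foldl _ (by
    intro c hc
    obtain ⟨kv, hkv, rfl⟩ := List.mem_map.mp hc
    exact hge1 kv hkv)]
  rw [List.foldl_map]
  refine PySem.List.foldl_congr_mem _ _ _ _ ?_
  intro acc kv hkv
  show (if (diagBestA kv.2).1 > acc.1 then ((diagBestA kv.2).1, kv.1, (diagBestA kv.2).2) else acc) = _
  rw [hAB kv hkv]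
  try rfl

-- ===== VERDICT (by name: the statement is the Claim_ definition above) =====
theorem find_diagonal_chains_py_spec : Claim_equal_find_diagonal_chains_py := by
  intro seed_pairs _
  unfold Spec_find_diagonal_chains_py find_diagonal_chains_py find_diagonal_chains_py_alt
  rw [show bestA = bestB from funext bestA_eq_bestB]
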